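-- pv_equiv track=rewrite | github.com/pypi-data/pypi-mirror-398 | packages/pdftl/pdftl-0.3.1-py3-none-any.whl/pdftl/commands/parsers/add_text_parser.py | _get_qualified_page_numbers
-- ===== SOURCE A (Python) =====
-- def _get_qualified_page_numbers(start, end, qualifier):
--     """
--     Generates a list of page numbers for a given range, filtered by a qualifier.
--     """
--     step = 1 if start <= end else -1
--     full_range = list(range(start, end + step, step))
--
--     if qualifier == "even":
--         return [p for p in full_range if p % 2 == 0]
--     if qualifier == "odd":
--         return [p for p in full_range if p % 2 != 0]
--
--     return full_range
-- ===== SOURCE B (Python) =====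
-- def _get_qualified_page_numbers(start, end, qualifier):
--     d = 1 if start <= end else -1
--     if qualifier not in ("even", "odd"):
--         return list(range(start, end + d, d))
--     want = 0 if qualifier == "even" else 1
--     first = start if start % 2 == want else start + d
--     if (d == 1 and first > end) or (d == -1 and first < end):
--         return []
--     return list(range(first, end + d, 2 * d))
-- ===== Notes on version B (the rewrite author's own statement) =====
-- stated objective: alternative
-- what changed: Instead of materialising the full inclusive range and filtering it by parity, B computes the first page of the wanted parity in the direction of travel and emits the answer directly as a stride-2 range (empty when that first page overshoots the end), keeping the plain full-range branch for other qualifiers.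
import Mathlib
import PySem

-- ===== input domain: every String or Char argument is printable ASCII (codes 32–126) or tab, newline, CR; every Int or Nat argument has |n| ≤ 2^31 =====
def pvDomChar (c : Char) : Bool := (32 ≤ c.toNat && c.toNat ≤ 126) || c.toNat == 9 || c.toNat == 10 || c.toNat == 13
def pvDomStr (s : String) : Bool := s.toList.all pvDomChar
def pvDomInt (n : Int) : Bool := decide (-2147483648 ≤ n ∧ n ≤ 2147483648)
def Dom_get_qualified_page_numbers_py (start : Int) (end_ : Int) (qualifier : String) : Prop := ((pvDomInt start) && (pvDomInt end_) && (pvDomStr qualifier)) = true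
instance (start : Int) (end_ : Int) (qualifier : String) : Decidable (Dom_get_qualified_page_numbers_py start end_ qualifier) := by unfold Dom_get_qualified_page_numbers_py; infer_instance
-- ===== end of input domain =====

-- B replaces enumerate-then-filter by direct construction: it jumps to the first page of the
-- wanted parity and emits the answer as a stride-2 range, never materialising the non-qualified
-- half (an alternative of similar cost).


-- ===== PORT A =====
def get_qualified_page_numbers_py (start : Int) (end_ : Int) (qualifier : String) : List Int :=
  let step : Int := if start ≤ end_ then 1 else -1
  let full_range := PySem.List.pyRange start (end_ + step) step
  if qualifier = "even" then full_range.filter (fun p => PySem.Int.mod p 2 == 0)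
  else if qualifier = "odd" then full_range.filter (fun p => PySem.Int.mod p 2 != 0)
  else full_range

-- ===== PORT B =====
def get_qualified_page_numbers_py_alt (start : Int) (end_ : Int) (qualifier : String) : List Int :=
  let d : Int := if start ≤ end_ then 1 else -1
  if ¬ (qualifier = "even" ∨ qualifier = "odd") then
    PySem.List.pyRange start (end_ + d) d
  else
    let want : Int := if qualifier = "even" then 0 else 1
    let first : Int := if PySem.Int.mod start 2 = want then start else start + d
    if (d = 1 ∧ first > end_) ∨ (d = -1 ∧ first < end_) then []
    else PySem.List.pyRange first (end_ + d) (2 * d)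

-- ===== PRECONDITION & SPEC =====
def Spec_get_qualified_page_numbers_py (start : Int) (end_ : Int) (qualifier : String) (out : List Int) : Prop := out = get_qualified_page_numbers_py_alt start end_ qualifier
instance (start : Int) (end_ : Int) (qualifier : String) (out : List Int) : Decidable (Spec_get_qualified_page_numbers_py start end_ qualifier out) := by unfold Spec_get_qualified_page_numbers_py; infer_instance

-- ===== CLAIM (what is proved, stated in full; the proofs are below) =====
def Claim_equal_get_qualified_page_numbers_py : Prop := ∀ (start : Int) (end_ : Int) (qualifier : String), Dom_get_qualified_page_numbers_py start end_ qualifier → Spec_get_qualified_page_numbers_py start end_ qualifier (get_qualified_page_numbers_py start end_ qualifier)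

-- ===== LEMMAS AND PROOFS =====

-- stride-2 ranges: nil and cons shapes (from pyRange's definition)
theorem pyRange_two_eq_nil (a b : Int) (h : b ≤ a) : PySem.List.pyRange a b 2 = [] := by
  simp [PySem.List.pyRange]; omega

theorem pyRange_neg_two_eq_nil (a b : Int) (h : a ≤ b) : PySem.List.pyRange a b (-2) = [] := by
  simp [PySem.List.pyRange]; omega

theorem pyRange_two_cons (a b : Int) (h : a < b) :
    PySem.List.pyRange a b 2 = a :: PySem.List.pyRange (a + 2) b 2 := by
  rw [PySem.List.pyRange_of_pos a b (by norm_num), PySem.List.pyRange_of_pos (a + 2) b (by norm_num)]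
  have hn : (if a < b then ((b - a + 2 - 1) / 2).toNat else 0)
      = (if a + 2 < b then ((b - (a + 2) + 2 - 1) / 2).toNat else 0) + 1 := by
    split_ifs <;> omega
  rw [hn, List.range_succ_eq_map]
  simp [List.map_map, Function.comp]
  intro k _
  ring

theorem pyRange_neg_two_cons (a b : Int) (h : b < a) :
    PySem.List.pyRange a b (-2) = a :: PySem.List.pyRange (a - 2) b (-2) := by
  simp only [PySem.List.pyRange]
  norm_num
  have hn : (if b < a then ((a - b + 2 - 1) / 2).toNat else 0)
      = (if b < a - 2 then ((a - 2 - b + 2 - 1) / 2).toNat else 0) + 1 := by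
    split_ifs <;> omega
  rw [hn, List.range_succ_eq_map]
  simp [List.map_map, Function.comp]
  intro k _
  ring

-- filtering an ascending unit range by parity is a stride-2 range from the first hit
theorem filter_parity_asc (w : Int) (hw : w = 0 ∨ w = 1) (b : Int) : ∀ (a : Int),
    (PySem.List.pyRange a b 1).filter (fun p => PySem.Int.mod p 2 == w)
      = PySem.List.pyRange (if PySem.Int.mod a 2 = w then a else a + 1) b 2 := by
  intro a
  have hma : PySem.Int.mod a 2 = a % 2 := PySem.Int.mod_eq_emod_of_pos (by norm_num)
  by_cases hab : b ≤ a
  · rw [PySem.List.pyRange_one_eq_nil hab, List.filter_nil]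
    split_ifs <;> exact (pyRange_two_eq_nil _ _ (by omega)).symm
  · replace hab : a < b := by omega
    have key := filter_parity_asc w hw b (a + 1)
    rw [PySem.List.pyRange_one_cons hab, List.filter_cons, key]
    have hma1 : PySem.Int.mod (a + 1) 2 = (a + 1) % 2 := PySem.Int.mod_eq_emod_of_pos (by norm_num)
    have h2 : a + 1 + 1 = a + 2 := by ring
    by_cases hcase : PySem.Int.mod a 2 = w
    · have h1 : ¬ PySem.Int.mod (a + 1) 2 = w := by omega
      rw [if_neg h1, if_pos hcase, h2]
      have hb : (PySem.Int.mod a 2 == w) = true := by rw [hcase]; exact beq_self_eq_true w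
      rw [hb, if_pos rfl]
      exact (pyRange_two_cons a b hab).symm
    · have h1 : PySem.Int.mod (a + 1) 2 = w := by omega
      rw [if_pos h1, if_neg hcase]
      have hb : (PySem.Int.mod a 2 == w) = false := beq_eq_false_iff_ne.mpr hcase
      rw [hb]
      simp
termination_by a => (b - a).toNat
decreasing_by omega

-- descending version
theorem filter_parity_desc (w : Int) (hw : w = 0 ∨ w = 1) (b : Int) : ∀ (a : Int),
    (PySem.List.pyRange a b (-1)).filter (fun p => PySem.Int.mod p 2 == w)
      = PySem.List.pyRange (if PySem.Int.mod a 2 = w then a else a - 1) b (-2) := by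
  intro a
  have hma : PySem.Int.mod a 2 = a % 2 := PySem.Int.mod_eq_emod_of_pos (by norm_num)
  by_cases hab : a ≤ b
  · rw [PySem.List.pyRange_neg_one_eq_nil hab, List.filter_nil]
    split_ifs <;> exact (pyRange_neg_two_eq_nil _ _ (by omega)).symm
  · replace hab : b < a := by omega
    have key := filter_parity_desc w hw b (a - 1)
    rw [PySem.List.pyRange_neg_one_cons hab, List.filter_cons, key]
    have hma1 : PySem.Int.mod (a - 1) 2 = (a - 1) % 2 := PySem.Int.mod_eq_emod_of_pos (by norm_num)
    have h2 : a - 1 - 1 = a - 2 := by ring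
    by_cases hcase : PySem.Int.mod a 2 = w
    · have h1 : ¬ PySem.Int.mod (a - 1) 2 = w := by omega
      rw [if_neg h1, if_pos hcase, h2]
      have hb : (PySem.Int.mod a 2 == w) = true := by rw [hcase]; exact beq_self_eq_true w
      rw [hb, if_pos rfl]
      exact (pyRange_neg_two_cons a b hab).symm
    · have h1 : PySem.Int.mod (a - 1) 2 = w := by omega
      rw [if_pos h1, if_neg hcase]
      have hb : (PySem.Int.mod a 2 == w) = false := beq_eq_false_iff_ne.mpr hcase
      rw [hb]
      simp
termination_by a => (a - b).toNat
decreasing_by omega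

-- odd filter: "p % 2 != 0" is "p % 2 == 1" on Int (mod by positive 2 is 0 or 1)
theorem odd_filter_eq (l : List Int) :
    l.filter (fun p => PySem.Int.mod p 2 != 0) = l.filter (fun p => PySem.Int.mod p 2 == 1) := by
  apply List.filter_congr
  intro p _
  have h0 : PySem.Int.mod p 2 = p % 2 := PySem.Int.mod_eq_emod_of_pos (by norm_num)
  rw [h0]
  have : p % 2 = 0 ∨ p % 2 = 1 := by omega
  rcases this with h | h <;> simp [h]

-- ===== VERDICT (by name: the statement is the Claim_ definition above) =====
theorem get_qualified_page_numbers_py_spec : Claim_equal_get_qualified_page_numbers_py := by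
  intro start end_ qualifier _
  unfold Spec_get_qualified_page_numbers_py
  simp only [get_qualified_page_numbers_py, get_qualified_page_numbers_py_alt]
  by_cases hle : start ≤ end_
  · simp only [if_pos hle]
    by_cases he : qualifier = "even"
    · subst he
      rw [if_pos rfl, if_neg (by decide : ¬¬(("even":String) = "even" ∨ ("even":String) = "odd")),
          if_pos rfl, filter_parity_asc 0 (Or.inl rfl)]
      norm_num
      split_ifs <;> first
        | rfl
        | (intro h; exact pyRange_two_eq_nil _ _ (by omega))
    · by_cases ho : qualifier = "odd"
      · subst ho
        rw [if_neg (by decide : ¬(("odd":String) = "even")), if_pos rfl,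
            if_neg (by decide : ¬¬(("odd":String) = "even" ∨ ("odd":String) = "odd")),
            if_neg (by decide : ¬(("odd":String) = "even")), odd_filter_eq,
            filter_parity_asc 1 (Or.inr rfl)]
        norm_num
        split_ifs <;> first
          | rfl
          | (intro h; exact pyRange_two_eq_nil _ _ (by omega))
      · rw [if_neg he, if_neg ho, if_pos (not_or_intro he ho)]
  · simp only [if_neg hle]
    have e1 : start + (-1 : Int) = start - 1 := by ring
    by_cases he : qualifier = "even"
    · subst he
      rw [if_pos rfl, if_neg (by decide : ¬¬(("even":String) = "even" ∨ ("even":String) = "odd")),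
          if_pos rfl, filter_parity_desc 0 (Or.inl rfl), e1]
      norm_num
      split_ifs <;> first
        | rfl
        | (intro h; exact pyRange_neg_two_eq_nil _ _ (by omega))
    · by_cases ho : qualifier = "odd"
      · subst ho
        rw [if_neg (by decide : ¬(("odd":String) = "even")), if_pos rfl,
            if_neg (by decide : ¬¬(("odd":String) = "even" ∨ ("odd":String) = "odd")),
            if_neg (by decide : ¬(("odd":String) = "even")), odd_filter_eq,
            filter_parity_desc 1 (Or.inr rfl), e1]
        norm_num
        split_ifs <;> first
          | rfl
          | (intro h; exact pyRange_neg_two_eq_nil _ _ (by omega))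
      · rw [if_neg he, if_neg ho, if_pos (not_or_intro he ho)]
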